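-- pv_equiv track=rewrite | github.com/fmi08icds/HomeWorks | achkar/hw3/hw2.py | isperfect_improved
-- ===== SOURCE A (Python) =====
-- def isperfect_improved(num: int):
--     """
--         This function is the first helper. It takes an integer n and checks if n has a perfect square root or not using binary search.
--         If n has a perfect square root, then it returns True and its perfect square root. If not, it returns False and n.
--
--         INPUT: n as an integer.
--         OUTPUT: a tuple (bool, int).
--
--         Examples:
--         isperfect_improved(0) = (True, 0)
--         isperfect_improved(1) = (True, 1)
--         isperfect_improved(3) = (False, 3)
--         isperfect_improved(16) = (True, 4)
--     """
--     lo = 1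
--     hi = num
--
--     # Binary Search
--     while (hi - lo > 1) :    #### <------ the worst case complexity still remains you could eliminate this while loop.
--         mid = (int)((hi + lo) / 2)
--         if (num == 0 or num == 1):
--             return True, num
--         elif (mid * mid == num) :
--             return True, mid
--         elif (mid * mid > num) :
--             hi = mid
--         elif (mid * mid < num) :
--             lo = mid
--
--     if (lo * lo == num):
--         return True, lo
--     elif (hi * hi == num):
--         return True, hi
--     else:
--         return False, num
-- ===== SOURCE B (Python) =====
-- def isperfect_improved(num: int):
--     # Newton's integer-sqrt iteration instead of binary search.
--     if num < 0:
--         return (False, num)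
--     if num == 0:
--         return (True, 0)
--     x = num
--     y = (x + num // x) // 2
--     while y < x:
--         x = y
--         y = (x + num // x) // 2
--     return (True, x) if x * x == num else (False, num)
-- ===== Notes on version B (the rewrite author's own statement) =====
-- stated objective: alternative
-- what changed: Replaces the binary search over [1, num] with a direct integer square-root computation by Newton's iteration followed by a single r*r == num check.
import Mathlib
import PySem

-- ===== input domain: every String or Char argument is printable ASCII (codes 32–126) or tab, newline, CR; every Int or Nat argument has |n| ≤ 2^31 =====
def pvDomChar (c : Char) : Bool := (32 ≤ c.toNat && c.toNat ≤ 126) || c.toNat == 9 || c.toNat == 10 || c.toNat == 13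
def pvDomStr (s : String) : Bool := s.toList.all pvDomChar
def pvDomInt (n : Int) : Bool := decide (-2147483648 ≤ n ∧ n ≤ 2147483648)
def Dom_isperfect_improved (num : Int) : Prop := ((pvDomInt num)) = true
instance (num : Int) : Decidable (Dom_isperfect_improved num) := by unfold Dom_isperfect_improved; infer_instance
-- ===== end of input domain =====

-- B replaces A's binary search with a hand-written Newton integer-sqrt iteration (objective: alternative algorithm, same result).

-- ===== PORT A =====
-- the while-loop of A; mid = int((hi+lo)/2): on every reachable state hi+lo > 0, where
-- Python's truncating float division agrees with Int.ediv (exact: |num| ≤ 2^31 < 2^53)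
def isperfectLoopA (num lo hi : Int) : Bool × Int :=
  if h : hi - lo > 1 then
    let mid := (hi + lo) / 2
    if num = 0 ∨ num = 1 then (true, num)
    else if mid * mid = num then (true, mid)
    else if mid * mid > num then isperfectLoopA num lo mid
    else isperfectLoopA num mid hi        -- Python's `elif mid*mid < num` branch
  else if lo * lo = num then (true, lo)
  else if hi * hi = num then (true, hi)
  else (false, num)
termination_by (hi - lo).toNat
decreasing_by
  · have : lo < (hi + lo) / 2 := by omega
    have : (hi + lo) / 2 < hi := by omega
    omega
  · have : lo < (hi + lo) / 2 := by omega
    have : (hi + lo) / 2 < hi := by omega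
    omega

def isperfect_improved (num : Int) : Bool × Int := isperfectLoopA num 1 num

-- ===== PORT B =====
-- the while-loop of B (Newton iteration); the extra `1 ≤ y` in the guard is a totality
-- guard only: on every reachable state 1 ≤ y holds (proved below), so it never fires
def newtonLoop (num x : Int) : Int :=
  let y := (x + num / x) / 2
  if 1 ≤ y ∧ y < x then newtonLoop num y else x
termination_by x.toNat

def isperfect_improved_alt (num : Int) : Bool × Int :=
  if num < 0 then (false, num)
  else if num = 0 then (true, 0)
  else
    let x := newtonLoop num num
    if x * x = num then (true, x) else (false, num)

-- ===== PRECONDITION & SPEC =====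
def Spec_isperfect_improved (num : Int) (out : Bool × Int) : Prop := out = isperfect_improved_alt num
instance (num : Int) (out : Bool × Int) : Decidable (Spec_isperfect_improved num out) := by unfold Spec_isperfect_improved; infer_instance

-- ===== CLAIM (what is proved, stated in full; the proofs are below) =====
def Claim_equal_isperfect_improved : Prop := ∀ (num : Int), Dom_isperfect_improved num → Spec_isperfect_improved num (isperfect_improved num)

-- ===== LEMMAS AND PROOFS =====

-- Newton's iteration, started at or above the integer square root s, returns s.
theorem newton_correct (s num x : Int) (hs : 1 ≤ s) (h1 : s * s ≤ num)
    (h2 : num < (s + 1) * (s + 1)) (hx : s ≤ x) : newtonLoop num x = s := by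
  rw [newtonLoop]
  have hx0 : 0 < x := by omega
  obtain ⟨d, hd1, hd2, hd3⟩ : ∃ d, x * d ≤ num ∧ num < x * d + x ∧ num / x = d := by
    refine ⟨num / x, ?_, ?_, rfl⟩ <;>
    · have he := Int.mul_ediv_add_emod num x
      have h01 := Int.emod_nonneg num (ne_of_gt hx0)
      have h02 := Int.emod_lt_of_pos num hx0
      omega
  rw [hd3]
  have hkey : 2 * s ≤ x + d := by nlinarith [sq_nonneg (x - s)]
  have hys : s ≤ (x + d) / 2 := by omega
  by_cases hg : 1 ≤ (x + d) / 2 ∧ (x + d) / 2 < x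
  · rw [if_pos hg]
    exact newton_correct s num ((x + d) / 2) hs h1 h2 hys
  · rw [if_neg hg]
    -- the loop stopped; show x = s
    by_contra hne
    have hxs : s + 1 ≤ x := by omega
    have hlt : num < x * x := by nlinarith
    have hdx : d < x := by nlinarith
    exact hg ⟨by omega, by omega⟩
termination_by x.toNat
decreasing_by omega

-- characterization of B via the integer square root s
theorem alt_eq (s num : Int) (hs : 1 ≤ s) (h1 : s * s ≤ num)
    (h2 : num < (s + 1) * (s + 1)) :
    isperfect_improved_alt num = if s * s = num then (true, s) else (false, num) := by
  have hn1 : 1 ≤ num := le_trans (by nlinarith) h1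
  have hsx : s ≤ num := by nlinarith
  rw [isperfect_improved_alt]
  rw [if_neg (by omega), if_neg (by omega)]
  simp only [newton_correct s num num hs h1 h2 hsx]

-- A's binary-search loop computes the same characterization
theorem loopA_eq (s num lo hi : Int) (hs : 1 ≤ s) (h1 : s * s ≤ num)
    (h2 : num < (s + 1) * (s + 1)) (hlo : 1 ≤ lo) (hlh : lo < hi)
    (hl2 : lo * lo < num) (hh2 : num < hi * hi) :
    isperfectLoopA num lo hi = if s * s = num then (true, s) else (false, num) := by
  have hn2 : 2 ≤ num := by nlinarith
  rw [isperfectLoopA]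
  by_cases hc : hi - lo > 1
  · simp only [hc, dite_true]
    have hm1 : lo < (hi + lo) / 2 := by omega
    have hm2 : (hi + lo) / 2 < hi := by omega
    rw [if_neg (by omega)]
    by_cases heq : ((hi + lo) / 2) * ((hi + lo) / 2) = num
    · rw [if_pos heq]
      have hmids : (hi + lo) / 2 = s := by
        have h3 : s ≤ (hi + lo) / 2 := by nlinarith
        have h4 : (hi + lo) / 2 ≤ s := by nlinarith
        omega
      rw [hmids] at heq ⊢
      rw [if_pos heq]
    · rw [if_neg heq]
      by_cases hgt : ((hi + lo) / 2) * ((hi + lo) / 2) > num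
      · rw [if_pos hgt]
        exact loopA_eq s num lo ((hi + lo) / 2) hs h1 h2 hlo hm1 hl2 hgt
      · rw [if_neg hgt]
        have hlt : ((hi + lo) / 2) * ((hi + lo) / 2) < num := by omega
        exact loopA_eq s num ((hi + lo) / 2) hi hs h1 h2 (by omega) hm2 hlt hh2
  · simp only [hc, dite_false]
    -- hi = lo + 1: lo*lo < num < (lo+1)², so num is not a square and s = lo
    have hhi : hi = lo + 1 := by omega
    subst hhi
    have hsl : s = lo := by
      have h3 : s ≤ lo := by nlinarith
      have h4 : lo ≤ s := by nlinarith
      omega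
    subst hsl
    rw [if_neg (by omega), if_neg (by omega), if_neg (by omega)]
termination_by (hi - lo).toNat
decreasing_by
  · omega
  · omega

-- every num ≥ 1 has an integer square root bracket
theorem exists_isqrt (num : Int) (h : 1 ≤ num) :
    ∃ s : Int, 1 ≤ s ∧ s * s ≤ num ∧ num < (s + 1) * (s + 1) := by
  refine ⟨(Nat.sqrt num.toNat : Int), ?_, ?_, ?_⟩
  · have : 1 ≤ Nat.sqrt num.toNat := by
      rw [Nat.le_sqrt]
      omega
    exact_mod_cast this
  · have h2 := Nat.sqrt_le' num.toNat
    rw [pow_two] at h2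
    have h3 : ((Nat.sqrt num.toNat * Nat.sqrt num.toNat : Nat) : Int) ≤ ((num.toNat : Nat) : Int) :=
      Int.ofNat_le.mpr h2
    push_cast at h3
    omega
  · have h2 := Nat.lt_succ_sqrt' num.toNat
    rw [pow_two] at h2
    have h3 : ((num.toNat : Nat) : Int) < (((Nat.sqrt num.toNat + 1) * (Nat.sqrt num.toNat + 1) : Nat) : Int) := by
      exact Int.ofNat_lt.mpr h2
    push_cast at h3
    omega

-- ===== VERDICT (by name: the statement is the Claim_ definition above) =====
theorem isperfect_improved_spec : Claim_equal_isperfect_improved := by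
  intro num _
  unfold Spec_isperfect_improved
  rcases (by omega : num < 0 ∨ 0 ≤ num) with hneg | hpos
  · -- negative: both return (false, num)
    rw [isperfect_improved, isperfectLoopA]
    rw [dif_neg (by omega)]
    have hsq : num * num ≠ num := by nlinarith
    rw [if_neg (by omega), if_neg hsq]
    rw [isperfect_improved_alt, if_pos hneg]
  · rcases eq_or_lt_of_le hpos with h0 | hpos1
    · -- num = 0
      subst h0
      rw [isperfect_improved, isperfectLoopA]
      norm_num
      rw [isperfect_improved_alt]
      norm_num
    · have h1 : 1 ≤ num := by omega
      rcases eq_or_lt_of_le h1 with h1e | h2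
      · -- num = 1
        rw [← h1e]
        rw [isperfect_improved, isperfectLoopA]
        norm_num
        rw [isperfect_improved_alt, newtonLoop]
        norm_num
      · -- num ≥ 2
        obtain ⟨s, hs, hs1, hs2⟩ := exists_isqrt num h1
        rw [isperfect_improved, loopA_eq s num 1 num hs hs1 hs2 le_rfl (by omega) (by omega) (by nlinarith),
          alt_eq s num hs hs1 hs2]
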